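-- pv_equiv track=rewrite | github.com/sanjaaa/pocpdftemplate | app.py | find_optimal_grouping
-- ===== SOURCE A (Python) =====
-- def max_y_distance(group):
--     if not group:
--         return 0
--     y_values = [p[1] for p in group]
--     return max(y_values) - min(y_values)
--
-- def find_optimal_grouping(points, tolerance):
--     points = sorted(points, key=lambda p: -p[1])  # Sort points by y descending
--     groups = []
--     current_group = []
--
--     for point in points:
--         if not current_group:
--             current_group.append(point)
--         else:
--             max_y = max(current_group, key=lambda p: p[1])[1]
--             min_y = min(current_group, key=lambda p: p[1])[1]
--             current_max_distance = max_y - min_y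
--             new_max_distance = max_y_distance(current_group + [point])
--
--             if new_max_distance < tolerance:
--                 current_group.append(point)
--             else:
--                 # Try to split the group optimally
--                 new_group = [point]
--                 remaining_group = current_group[:]
--
--                 for p in current_group:
--                     temp_group = new_group + [p]
--                     temp_remaining_group = remaining_group[:]
--                     temp_remaining_group.remove(p)
--                     if max_y_distance(temp_group) < max_y_distance(temp_remaining_group + [p]):
--                         new_group.append(p)
--                         remaining_group.remove(p)
--
--                 groups.append(remaining_group)
--                 current_group = new_group
--
--     if current_group:
--         groups.append(current_group)
--
--     return groups
-- ===== SOURCE B (Python) =====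
-- def find_optimal_grouping(points, tolerance):
--     pts = sorted(points, key=lambda p: p[1], reverse=True)
--     groups = []
--     cur = []
--     gmax = gmin = 0  # running max/min y of cur (valid while cur is nonempty)
--     for pt in pts:
--         y = pt[1]
--         if not cur:
--             cur = [pt]
--             gmax = gmin = y
--         elif gmax - y < tolerance:
--             # pt's y is the new minimum: no rescan needed
--             cur.append(pt)
--             gmin = y
--         else:
--             # one-pass split: suffix max/min of y over cur, then a single sweep
--             suf = []
--             for p in reversed(cur):
--                 v = p[1]
--                 if suf:
--                     sm, sn = suf[-1]
--                     suf.append((max(v, sm), min(v, sn)))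
--                 else:
--                     suf.append((v, v))
--             suf.reverse()
--             kept = []
--             moved = []
--             mmax = y            # max y of [pt] + moved
--             kmax = kmin = None  # running max/min y of kept
--             for p, (smax, smin) in zip(cur, suf):
--                 v = p[1]
--                 rmax = smax if kmax is None else max(kmax, smax)
--                 rmin = smin if kmin is None else min(kmin, smin)
--                 if max(mmax, v) - y < rmax - rmin:
--                     moved.append(p)
--                     mmax = max(mmax, v)
--                 else:
--                     kept.append(p)
--                     kmax = v if kmax is None else max(kmax, v)
--                     kmin = v if kmin is None else min(kmin, v)
--             groups.append(kept)
--             cur = [pt] + moved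
--             gmax = mmax
--             gmin = y
--     if cur:
--         groups.append(cur)
--     return groups
-- ===== Notes on version B (the rewrite author's own statement) =====
-- stated objective: faster
-- what changed: B tracks the group's max/min y incrementally (each new point is the running minimum since the list is sorted descending) and performs each split in a single sweep using a precomputed suffix max/min scan, replacing A's per-point full rescans of the group and the per-split inner loop that recomputes max/min of whole lists and calls list.remove at every step.
import Mathlib
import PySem

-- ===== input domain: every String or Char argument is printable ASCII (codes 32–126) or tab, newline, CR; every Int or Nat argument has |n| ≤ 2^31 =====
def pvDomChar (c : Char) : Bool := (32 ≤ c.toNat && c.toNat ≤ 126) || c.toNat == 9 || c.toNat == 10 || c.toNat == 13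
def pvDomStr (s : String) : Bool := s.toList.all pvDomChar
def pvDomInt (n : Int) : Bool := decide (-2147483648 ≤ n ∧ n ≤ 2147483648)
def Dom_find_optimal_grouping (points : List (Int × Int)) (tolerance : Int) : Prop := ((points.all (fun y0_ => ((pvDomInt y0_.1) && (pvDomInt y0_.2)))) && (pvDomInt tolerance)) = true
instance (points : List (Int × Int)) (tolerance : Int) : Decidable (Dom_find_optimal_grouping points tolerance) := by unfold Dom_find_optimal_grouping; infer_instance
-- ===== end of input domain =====

-- B replaces A's per-point and per-split-step full rescans of the group by an incrementally
-- maintained max/min and a one-sweep split with a precomputed suffix max/min scan (objective: faster).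

-- ===== PORT A =====
def max_y_distance (group : List (Int × Int)) : Int :=
  if group = [] then 0
  else
    let y_values := group.map (fun p => p.2)
    ((PySem.List.max? y_values (fun y => y)).getD 0) -
      ((PySem.List.min? y_values (fun y => y)).getD 0)

-- one step of A's inner split loop; `remove` always succeeds in A (p is in the list), the
-- `.getD` fallback is unreachable
def pvStepSplitA (point : Int × Int) (s : List (Int × Int) × List (Int × Int))
    (p : Int × Int) : List (Int × Int) × List (Int × Int) :=
  let temp_group := s.1 ++ [p]
  let temp_remaining_group := (PySem.List.remove? s.2 p).getD s.2
  if max_y_distance temp_group < max_y_distance (temp_remaining_group ++ [p]) then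
    (s.1 ++ [p], (PySem.List.remove? s.2 p).getD s.2)
  else s

def pvStepA (tolerance : Int) (st : List (List (Int × Int)) × List (Int × Int))
    (point : Int × Int) : List (List (Int × Int)) × List (Int × Int) :=
  let groups := st.1
  let cur := st.2
  if cur = [] then (groups, cur ++ [point])
  else
    let max_y := ((PySem.List.max? cur (fun p => p.2)).getD point).2
    let min_y := ((PySem.List.min? cur (fun p => p.2)).getD point).2
    let current_max_distance := max_y - min_y
    let new_max_distance := max_y_distance (cur ++ [point])
    if new_max_distance < tolerance then (groups, cur ++ [point])
    else
      let r := cur.foldl (pvStepSplitA point) ([point], cur)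
      (groups ++ [r.2], r.1)

def find_optimal_grouping (points : List (Int × Int)) (tolerance : Int) :
    List (List (Int × Int)) :=
  let pts := PySem.List.sorted points (fun p => -p.2)
  let st := pts.foldl (pvStepA tolerance) ([], [])
  if st.2 ≠ [] then st.1 ++ [st.2] else st.1

-- ===== PORT B =====
-- suffix (max,min) of the y's: entry i is the extrema of cur[i:]
def pvSufScanB (cur : List (Int × Int)) : List (Int × Int) :=
  List.foldr (fun p acc =>
    match acc with
    | [] => [(p.2, p.2)]
    | (sm, sn) :: _ => (max p.2 sm, min p.2 sn) :: acc) [] cur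

-- 'smax if kmax is None else max(kmax, smax)' and its min twin
def pvMaxO (k : Option Int) (v : Int) : Int := match k with | none => v | some k => max k v
def pvMinO (k : Option Int) (v : Int) : Int := match k with | none => v | some k => min k v

def pvSplitB (y : Int) : List (Int × Int) → List (Int × Int) → Int → Option Int → Option Int →
    List (Int × Int) → List (Int × Int) → List (Int × Int) × List (Int × Int) × Int
  | p :: cs, (smax, smin) :: ss, mmax, kmax, kmin, kept, moved =>
      let v := p.2
      let rmax := pvMaxO kmax smax
      let rmin := pvMinO kmin smin
      if max mmax v - y < rmax - rmin then
        pvSplitB y cs ss (max mmax v) kmax kmin kept (moved ++ [p])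
      else
        pvSplitB y cs ss mmax (some (pvMaxO kmax v)) (some (pvMinO kmin v))
          (kept ++ [p]) moved
  | _, _, mmax, _, _, kept, moved => (kept, moved, mmax)

def pvStepB (tolerance : Int)
    (st : List (List (Int × Int)) × List (Int × Int) × Int × Int)
    (pt : Int × Int) : List (List (Int × Int)) × List (Int × Int) × Int × Int :=
  let groups := st.1
  let cur := st.2.1
  let gmax := st.2.2.1
  let gmin := st.2.2.2
  let y := pt.2
  if cur = [] then (groups, [pt], y, y)
  else if gmax - y < tolerance then (groups, cur ++ [pt], gmax, y)
  else
    let suf := pvSufScanB cur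
    let r := pvSplitB y cur suf y none none [] []
    (groups ++ [r.1], pt :: r.2.1, r.2.2, y)

def find_optimal_grouping_alt (points : List (Int × Int)) (tolerance : Int) :
    List (List (Int × Int)) :=
  let pts := PySem.List.sorted points (fun p => p.2) true
  let st := pts.foldl (pvStepB tolerance) ([], [], 0, 0)
  if st.2.1 ≠ [] then st.1 ++ [st.2.1] else st.1

-- ===== PRECONDITION & SPEC =====
def Spec_find_optimal_grouping (points : List (Int × Int)) (tolerance : Int) (out : List (List (Int × Int))) : Prop := out = find_optimal_grouping_alt points tolerance
instance (points : List (Int × Int)) (tolerance : Int) (out : List (List (Int × Int))) : Decidable (Spec_find_optimal_grouping points tolerance out) := by unfold Spec_find_optimal_grouping; infer_instance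

-- ===== CLAIM (what is proved, stated in full; the proofs are below) =====
def Claim_equal_find_optimal_grouping : Prop := ∀ (points : List (Int × Int)) (tolerance : Int), Dom_find_optimal_grouping points tolerance → Spec_find_optimal_grouping points tolerance (find_optimal_grouping points tolerance)

-- ===== LEMMAS AND PROOFS =====

-- running max / min of the y's of a list, seeded with a
def pvYmax (a : Int) (l : List (Int × Int)) : Int := l.foldl (fun m q => max m q.2) a
def pvYmin (a : Int) (l : List (Int × Int)) : Int := l.foldl (fun m q => min m q.2) a

theorem pvYmax_nil (a : Int) : pvYmax a [] = a := rfl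
theorem pvYmin_nil (a : Int) : pvYmin a [] = a := rfl

theorem pvYmax_cons' (a : Int) (p : Int × Int) (l : List (Int × Int)) :
    pvYmax a (p :: l) = pvYmax (max a p.2) l := rfl
theorem pvYmin_cons' (a : Int) (p : Int × Int) (l : List (Int × Int)) :
    pvYmin a (p :: l) = pvYmin (min a p.2) l := rfl

theorem pvYmax_max (a b : Int) (l : List (Int × Int)) :
    pvYmax (max a b) l = max a (pvYmax b l) := by
  induction l generalizing b with
  | nil => rfl
  | cons p l ih =>
      rw [pvYmax_cons', pvYmax_cons', max_assoc, ih]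

theorem pvYmin_min (a b : Int) (l : List (Int × Int)) :
    pvYmin (min a b) l = min a (pvYmin b l) := by
  induction l generalizing b with
  | nil => rfl
  | cons p l ih =>
      rw [pvYmin_cons', pvYmin_cons', min_assoc, ih]

theorem pvYmax_cons (a : Int) (p : Int × Int) (l : List (Int × Int)) :
    pvYmax a (p :: l) = max a (pvYmax p.2 l) := by
  rw [pvYmax_cons', pvYmax_max]

theorem pvYmin_cons (a : Int) (p : Int × Int) (l : List (Int × Int)) :
    pvYmin a (p :: l) = min a (pvYmin p.2 l) := by
  rw [pvYmin_cons', pvYmin_min]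

theorem pvYmax_append (a : Int) (l l' : List (Int × Int)) :
    pvYmax a (l ++ l') = pvYmax (pvYmax a l) l' := by
  simp [pvYmax, List.foldl_append]

theorem pvYmin_append (a : Int) (l l' : List (Int × Int)) :
    pvYmin a (l ++ l') = pvYmin (pvYmin a l) l' := by
  simp [pvYmin, List.foldl_append]

theorem pvYmax_le_base (a : Int) (l : List (Int × Int)) : a ≤ pvYmax a l := by
  induction l generalizing a with
  | nil => simp [pvYmax_nil]
  | cons p l ih => rw [pvYmax_cons]; exact le_max_of_le_left le_rfl

theorem pvYmin_le_base (a : Int) (l : List (Int × Int)) : pvYmin a l ≤ a := by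
  induction l generalizing a with
  | nil => simp [pvYmin_nil]
  | cons p l ih => rw [pvYmin_cons]; exact min_le_left _ _

theorem pvYmax_mem_le (a : Int) {l : List (Int × Int)} {q : Int × Int} (hq : q ∈ l) :
    q.2 ≤ pvYmax a l := by
  induction l generalizing a with
  | nil => cases hq
  | cons p l ih =>
      rw [pvYmax_cons]
      rcases List.mem_cons.1 hq with h | h
      · subst h; exact le_max_of_le_right (pvYmax_le_base _ _)
      · exact le_max_of_le_right (ih _ h)

theorem pvYmin_mem_le (a : Int) {l : List (Int × Int)} {q : Int × Int} (hq : q ∈ l) :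
    pvYmin a l ≤ q.2 := by
  induction l generalizing a with
  | nil => cases hq
  | cons p l ih =>
      rw [pvYmin_cons]
      rcases List.mem_cons.1 hq with h | h
      · subst h; exact min_le_of_right_le (pvYmin_le_base _ _)
      · exact min_le_of_right_le (ih _ h)

theorem pvYmin_attained (a : Int) (l : List (Int × Int)) :
    pvYmin a l = a ∨ ∃ q ∈ l, pvYmin a l = q.2 := by
  induction l generalizing a with
  | nil => left; rfl
  | cons p l ih =>
      rw [pvYmin_cons]
      rcases le_total (pvYmin p.2 l) a with h | h
      · rcases ih p.2 with h2 | ⟨q, hq, h2⟩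
        · right; exact ⟨p, List.mem_cons_self, by rw [min_eq_right h, h2]⟩
        · right; exact ⟨q, List.mem_cons_of_mem _ hq, by rw [min_eq_right h, h2]⟩
      · left; exact min_eq_left h

theorem pvYmax_mono (a b : Int) (l : List (Int × Int)) (h : a ≤ b) :
    pvYmax a l ≤ pvYmax b l := by
  induction l generalizing a b with
  | nil => simpa
  | cons p l ih => rw [pvYmax_cons', pvYmax_cons']; exact ih _ _ (max_le_max_right _ h)

theorem pvYmin_mono (a b : Int) (l : List (Int × Int)) (h : a ≤ b) :
    pvYmin a l ≤ pvYmin b l := by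
  induction l generalizing a b with
  | nil => simpa
  | cons p l ih => rw [pvYmin_cons', pvYmin_cons']; exact ih _ _ (min_le_min_right _ h)

theorem pvYmin_const (a : Int) (l : List (Int × Int)) (h : ∀ q ∈ l, a ≤ q.2) :
    pvYmin a l = a := by
  induction l generalizing a with
  | nil => rfl
  | cons p l ih =>
      rw [pvYmin_cons', min_eq_left (h p List.mem_cons_self)]
      exact ih a (fun q hq => h q (List.mem_cons_of_mem _ hq))

theorem pvYmax_perm (a : Int) {l₁ l₂ : List (Int × Int)} (h : l₁.Perm l₂) :
    pvYmax a l₁ = pvYmax a l₂ := by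
  induction h generalizing a with
  | nil => rfl
  | cons x _ ih => rw [pvYmax_cons', pvYmax_cons', ih]
  | swap x y l => rw [pvYmax_cons', pvYmax_cons', pvYmax_cons', pvYmax_cons', max_right_comm]
  | trans _ _ ih1 ih2 => rw [ih1, ih2]

theorem pvYmin_perm (a : Int) {l₁ l₂ : List (Int × Int)} (h : l₁.Perm l₂) :
    pvYmin a l₁ = pvYmin a l₂ := by
  induction h generalizing a with
  | nil => rfl
  | cons x _ ih => rw [pvYmin_cons', pvYmin_cons', ih]
  | swap x y l => rw [pvYmin_cons', pvYmin_cons', pvYmin_cons', pvYmin_cons', min_right_comm]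
  | trans _ _ ih1 ih2 => rw [ih1, ih2]

-- max_y_distance on a cons in terms of pvYmax / pvYmin
theorem pvMyd_cons (c : Int × Int) (t : List (Int × Int)) :
    max_y_distance (c :: t) = pvYmax c.2 t - pvYmin c.2 t := by
  have hmap : (c :: t).map (fun p => p.2) = c.2 :: t.map (fun p => p.2) := rfl
  simp only [max_y_distance, hmap, reduceCtorEq, if_false]
  rw [PySem.List.max?_id_cons, PySem.List.min?_id_cons]
  simp [pvYmax, pvYmin, List.foldl_map]

theorem pvMyd_perm {l₁ l₂ : List (Int × Int)} (h : l₁.Perm l₂) :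
    max_y_distance l₁ = max_y_distance l₂ := by
  cases l₁ with
  | nil => rw [← h.nil_eq]
  | cons c t =>
      cases l₂ with
      | nil => exact absurd h.symm.nil_eq (by simp)
      | cons d u =>
          rw [pvMyd_cons, pvMyd_cons]
          have h1 : pvYmax c.2 t = pvYmax c.2 (c :: t) := by
            rw [pvYmax_cons, max_eq_right (pvYmax_le_base _ _)]
          have h2 : pvYmin c.2 t = pvYmin c.2 (c :: t) := by
            rw [pvYmin_cons, min_eq_right (pvYmin_le_base _ _)]
          have hc : c ∈ d :: u := h.mem_iff.1 List.mem_cons_self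
          have h3 : pvYmax c.2 (d :: u) = pvYmax d.2 u := by
            rw [pvYmax_cons]
            apply max_eq_right
            rcases List.mem_cons.1 hc with h' | h'
            · rw [h']; exact pvYmax_le_base _ _
            · exact pvYmax_mem_le _ h'
          have h4 : pvYmin c.2 (d :: u) = pvYmin d.2 u := by
            rw [pvYmin_cons]
            apply min_eq_right
            rcases List.mem_cons.1 hc with h' | h'
            · rw [h']; exact pvYmin_le_base _ _
            · exact pvYmin_mem_le _ h'
          rw [h1, h2, pvYmax_perm _ h, pvYmin_perm _ h, h3, h4]

theorem pvMyd_nonneg (l : List (Int × Int)) : 0 ≤ max_y_distance l := by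
  cases l with
  | nil => simp [max_y_distance]
  | cons c t =>
      rw [pvMyd_cons]
      have := pvYmin_le_base c.2 t
      have := pvYmax_le_base c.2 t
      omega

-- dropping an element of the remainder can only shrink the spread
theorem pvMyd_drop (kept cs : List (Int × Int)) (p : Int × Int) :
    max_y_distance (kept ++ cs) ≤ max_y_distance (kept ++ p :: cs) := by
  cases kept with
  | nil =>
      cases cs with
      | nil => simpa [max_y_distance] using pvMyd_nonneg [p]
      | cons c t =>
          simp only [List.nil_append]
          rw [pvMyd_cons, pvMyd_cons, pvYmax_cons, pvYmin_cons]
          have h1 : pvYmax c.2 t ≤ max p.2 (pvYmax c.2 t) := le_max_right _ _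
          have h2 : min p.2 (pvYmin c.2 t) ≤ pvYmin c.2 t := min_le_right _ _
          omega
  | cons c t =>
      simp only [List.cons_append]
      rw [pvMyd_cons, pvMyd_cons, pvYmax_append, pvYmax_append, pvYmin_append, pvYmin_append,
        pvYmax_cons', pvYmin_cons']
      have h1 : pvYmax (pvYmax c.2 t) cs ≤ pvYmax (max (pvYmax c.2 t) p.2) cs :=
        pvYmax_mono _ _ _ (le_max_left _ _)
      have h2 : pvYmin (min (pvYmin c.2 t) p.2) cs ≤ pvYmin (pvYmin c.2 t) cs :=
        pvYmin_mono _ _ _ (min_le_left _ _)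
      omega

-- value of Python's max(cur, key=...)[1] / min(cur, key=...)[1]
-- suffix scan produces (pvYmax, pvYmin) of each suffix
theorem pvSufScan_cons (p : Int × Int) (cs : List (Int × Int)) :
    pvSufScanB (p :: cs) = (pvYmax p.2 cs, pvYmin p.2 cs) :: pvSufScanB cs := by
  induction cs generalizing p with
  | nil => rfl
  | cons q cs ih =>
      show (List.foldr _ _ (p :: q :: cs)) = _
      rw [List.foldr_cons]
      have : List.foldr _ _ (q :: cs) = pvSufScanB (q :: cs) := rfl
      rw [this, ih q]
      simp only []
      rw [pvYmax_cons, pvYmin_cons]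

-- the Option-tracked extrema of the kept list
def pvOmax : List (Int × Int) → Option Int
  | [] => none
  | c :: t => some (pvYmax c.2 t)
def pvOmin : List (Int × Int) → Option Int
  | [] => none
  | c :: t => some (pvYmin c.2 t)

theorem pvOmax_append (kept : List (Int × Int)) (p : Int × Int) :
    pvOmax (kept ++ [p]) = some (pvMaxO (pvOmax kept) p.2) := by
  cases kept with
  | nil => rfl
  | cons c t =>
      simp only [pvOmax, List.cons_append, pvMaxO]
      rw [pvYmax_append]
      rfl

theorem pvOmin_append (kept : List (Int × Int)) (p : Int × Int) :
    pvOmin (kept ++ [p]) = some (pvMinO (pvOmin kept) p.2) := by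
  cases kept with
  | nil => rfl
  | cons c t =>
      simp only [pvOmin, List.cons_append, pvMinO]
      rw [pvYmin_append]
      rfl

-- spread of kept ++ p :: cs equals B's rmax - rmin
theorem pvMyd_mid (kept cs : List (Int × Int)) (p : Int × Int) :
    max_y_distance (kept ++ p :: cs) =
      pvMaxO (pvOmax kept) (pvYmax p.2 cs) - pvMinO (pvOmin kept) (pvYmin p.2 cs) := by
  cases kept with
  | nil => simp only [List.nil_append, pvOmax, pvOmin, pvMaxO, pvMinO]; rw [pvMyd_cons]
  | cons c t =>
      simp only [List.cons_append, pvOmax, pvOmin, pvMaxO, pvMinO]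
      rw [pvMyd_cons, pvYmax_append, pvYmin_append, pvYmax_cons, pvYmin_cons]

-- pvSplitB's returned moved list consists of old moved and cs elements
theorem pvSplitB_moved_sub (y : Int) :
    ∀ (cs ss : List (Int × Int)) (mmax : Int) (kmax kmin : Option Int)
      (kept moved : List (Int × Int)),
      ∀ q ∈ (pvSplitB y cs ss mmax kmax kmin kept moved).2.1, q ∈ moved ∨ q ∈ cs := by
  intro cs
  induction cs with
  | nil => intro ss mmax kmax kmin kept moved q hq; left; cases ss <;> simpa [pvSplitB] using hq
  | cons p cs ih =>
      intro ss mmax kmax kmin kept moved q hq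
      cases ss with
      | nil => left; simpa [pvSplitB] using hq
      | cons s ss =>
          obtain ⟨sm, sn⟩ := s
          simp only [pvSplitB] at hq
          split at hq
          · rcases ih _ _ _ _ _ _ q hq with h | h
            · rcases List.mem_append.1 h with h' | h'
              · exact Or.inl h'
              · exact Or.inr (List.mem_cons.2 (Or.inl (by simpa using h')))
            · exact Or.inr (List.mem_cons_of_mem _ h)
          · rcases ih _ _ _ _ _ _ q hq with h | h
            · exact Or.inl h
            · exact Or.inr (List.mem_cons_of_mem _ h)

-- pvSplitB's returned mmax tracks the max y over point :: moved
theorem pvSplitB_mmax (y : Int) :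
    ∀ (cs ss : List (Int × Int)) (mmax : Int) (kmax kmin : Option Int)
      (kept moved : List (Int × Int)),
      mmax = pvYmax y moved →
      (pvSplitB y cs ss mmax kmax kmin kept moved).2.2 =
        pvYmax y (pvSplitB y cs ss mmax kmax kmin kept moved).2.1 := by
  intro cs
  induction cs with
  | nil => intro ss mmax kmax kmin kept moved h; cases ss <;> simpa [pvSplitB] using h
  | cons p cs ih =>
      intro ss mmax kmax kmin kept moved h
      cases ss with
      | nil => simpa [pvSplitB] using h
      | cons s ss =>
          obtain ⟨sm, sn⟩ := s
          simp only [pvSplitB]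
          split
          · exact ih _ _ _ _ _ _ (by rw [h, pvYmax_append]; rfl)
          · exact ih _ _ _ _ _ _ h

-- the core inner-loop equivalence
theorem pvInner_eq (point : Int × Int) :
    ∀ (cs kept moved : List (Int × Int)),
      (∀ q ∈ kept, point.2 ≤ q.2) → (∀ q ∈ cs, point.2 ≤ q.2) → (∀ q ∈ moved, point.2 ≤ q.2) →
      (∀ q ∈ kept, max_y_distance (kept ++ cs) ≤ max (pvYmax point.2 moved) q.2 - point.2) →
      List.foldl (pvStepSplitA point) (point :: moved, kept ++ cs) cs =
        ((point :: (pvSplitB point.2 cs (pvSufScanB cs) (pvYmax point.2 moved)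
            (pvOmax kept) (pvOmin kept) kept moved).2.1),
         (pvSplitB point.2 cs (pvSufScanB cs) (pvYmax point.2 moved)
            (pvOmax kept) (pvOmin kept) kept moved).1) := by
  intro cs
  induction cs with
  | nil =>
      intro kept moved _ _ _ _
      simp [pvSplitB]
  | cons p cs ih =>
      intro kept moved hkept hcs hmoved hI
      have hpm : p ∈ kept ++ p :: cs := List.mem_append.2 (Or.inr List.mem_cons_self)
      have hpy : point.2 ≤ p.2 := hcs p List.mem_cons_self
      have hcs' : ∀ q ∈ cs, point.2 ≤ q.2 := fun q hq => hcs q (List.mem_cons_of_mem _ hq)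
      -- A's step
      rw [List.foldl_cons]
      have hrem : (PySem.List.remove? (kept ++ p :: cs) p).getD (kept ++ p :: cs)
          = (kept ++ p :: cs).erase p := by
        rw [PySem.List.remove?_eq_some_erase _ p hpm]; rfl
      -- the two branch conditions are the same number comparison
      have hlhs : max_y_distance ((point :: moved) ++ [p])
          = max (pvYmax point.2 moved) p.2 - point.2 := by
        rw [List.cons_append, pvMyd_cons, pvYmax_append, pvYmin_append]
        have h1 : pvYmax (pvYmax point.2 moved) [p] = max (pvYmax point.2 moved) p.2 := rfl
        have h2 : pvYmin (pvYmin point.2 moved) [p] = min (pvYmin point.2 moved) p.2 := rfl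
        rw [h1, h2, pvYmin_const point.2 moved hmoved, min_eq_left hpy]
      have hperm : ((kept ++ p :: cs).erase p ++ [p]).Perm (kept ++ p :: cs) :=
        (List.perm_append_singleton _ _).trans (List.perm_cons_erase hpm).symm
      have hrhs : max_y_distance ((kept ++ p :: cs).erase p ++ [p])
          = max_y_distance (kept ++ p :: cs) := pvMyd_perm hperm
      have hmid := pvMyd_mid kept cs p
      -- B's step
      rw [pvSufScan_cons]
      simp only [pvSplitB, pvStepSplitA, hrem, hlhs, hrhs, hmid]
      by_cases hc : max (pvYmax point.2 moved) p.2 - point.2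
          < pvMaxO (pvOmax kept) (pvYmax p.2 cs) - pvMinO (pvOmin kept) (pvYmin p.2 cs)
      · -- p is moved
        rw [if_pos hc, if_pos hc]
        have hpk : p ∉ kept := by
          intro hk
          have := hI p hk
          rw [hmid] at this
          omega
        have herase : (kept ++ p :: cs).erase p = kept ++ cs := by
          rw [List.erase_append_right _ hpk, List.erase_cons_head]
        have hm' : max (pvYmax point.2 moved) p.2 = pvYmax point.2 (moved ++ [p]) := by
          rw [pvYmax_append]; rfl
        rw [herase, List.cons_append, hm']
        refine ih kept (moved ++ [p]) hkept hcs' ?_ ?_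
        · intro q hq
          rcases List.mem_append.1 hq with h | h
          · exact hmoved q h
          · simp only [List.mem_singleton] at h; subst h; exact hpy
        · intro q hq
          have h1 := pvMyd_drop kept cs p
          have h2 := hI q hq
          have h3 : max (pvYmax point.2 moved) q.2
              ≤ max (pvYmax point.2 (moved ++ [p])) q.2 := by
            apply max_le_max _ le_rfl
            rw [← hm']; exact le_max_left _ _
          omega
      · -- p is kept
        rw [if_neg hc, if_neg hc]
        have hks : kept ++ p :: cs = (kept ++ [p]) ++ cs := by simp
        have hOmax := (pvOmax_append kept p).symm
        have hOmin := (pvOmin_append kept p).symm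
        rw [hks, hOmax, hOmin]
        refine ih (kept ++ [p]) moved ?_ hcs' hmoved ?_
        · intro q hq
          rcases List.mem_append.1 hq with h | h
          · exact hkept q h
          · simp only [List.mem_singleton] at h; subst h; exact hpy
        · intro q hq
          rw [← hks]
          rcases List.mem_append.1 hq with h | h
          · exact hI q h
          · simp only [List.mem_singleton] at h; subst h
            rw [hmid]
            omega

-- the outer fold equivalence
theorem pvOuter_eq (tolerance : Int) :
    ∀ (l : List (Int × Int)) (groups : List (List (Int × Int)))
      (cur : List (Int × Int)) (gmax gmin : Int),
      List.Pairwise (fun a b => b.2 ≤ a.2) l →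
      (∀ p ∈ l, ∀ q ∈ cur, p.2 ≤ q.2) →
      (cur = [] ∨ ∃ c t, cur = c :: t ∧ gmax = pvYmax c.2 t ∧ gmin = pvYmin c.2 t) →
      (List.foldl (pvStepA tolerance) (groups, cur) l).1 =
          (List.foldl (pvStepB tolerance) (groups, cur, gmax, gmin) l).1 ∧
        (List.foldl (pvStepA tolerance) (groups, cur) l).2 =
          (List.foldl (pvStepB tolerance) (groups, cur, gmax, gmin) l).2.1 := by
  intro l
  induction l with
  | nil => intro groups cur gmax gmin _ _ _; exact ⟨rfl, rfl⟩
  | cons pt l ih =>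
      intro groups cur gmax gmin hpair hmem hinv
      have hd := (List.pairwise_cons.1 hpair).1
      have hpair' := (List.pairwise_cons.1 hpair).2
      rcases hinv with hnil | ⟨c, t, hcur, hgmax, hgmin⟩
      · subst hnil
        rw [List.foldl_cons, List.foldl_cons]
        simp only [pvStepA, pvStepB, if_pos, List.nil_append]
        refine ih groups [pt] pt.2 pt.2 hpair' ?_ ?_
        · intro p hp q hq
          simp only [List.mem_singleton] at hq; subst hq
          exact hd p hp
        · right; exact ⟨pt, [], rfl, rfl, rfl⟩
      · subst hcur
        have hpt : ∀ q ∈ c :: t, pt.2 ≤ q.2 := hmem pt List.mem_cons_self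
        have hptmin : pt.2 ≤ gmin := by
          rcases pvYmin_attained c.2 t with h | ⟨q, hq, h⟩
          · rw [hgmin, h]; exact hpt c List.mem_cons_self
          · rw [hgmin, h]; exact hpt q (List.mem_cons_of_mem _ hq)
        have hminmax : gmin ≤ gmax := by
          rw [hgmin, hgmax]
          exact le_trans (pvYmin_le_base _ _) (pvYmax_le_base _ _)
        have hnmd : max_y_distance ((c :: t) ++ [pt]) = gmax - pt.2 := by
          rw [List.cons_append, pvMyd_cons, pvYmax_append, pvYmin_append]
          have h1 : pvYmax (pvYmax c.2 t) [pt] = max (pvYmax c.2 t) pt.2 := rfl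
          have h2 : pvYmin (pvYmin c.2 t) [pt] = min (pvYmin c.2 t) pt.2 := rfl
          rw [h1, h2, ← hgmax, ← hgmin, max_eq_left (le_trans hptmin hminmax),
            min_eq_right hptmin]
        rw [List.foldl_cons, List.foldl_cons]
        by_cases hc : gmax - pt.2 < tolerance
        · -- append branch
          have hA : pvStepA tolerance (groups, c :: t) pt = (groups, (c :: t) ++ [pt]) := by
            simp only [pvStepA]
            rw [if_neg (by simp), hnmd, if_pos hc]
          have hB : pvStepB tolerance (groups, c :: t, gmax, gmin) pt
              = (groups, (c :: t) ++ [pt], gmax, pt.2) := by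
            simp only [pvStepB]
            rw [if_neg (by simp), if_pos hc]
          rw [hA, hB]
          refine ih groups ((c :: t) ++ [pt]) gmax pt.2 hpair' ?_ ?_
          · intro p hp q hq
            rcases List.mem_append.1 hq with h | h
            · exact le_trans (hd p hp) (hpt q h)
            · simp only [List.mem_singleton] at h; subst h; exact hd p hp
          · right
            refine ⟨c, t ++ [pt], rfl, ?_, ?_⟩
            · rw [pvYmax_append, ← hgmax]
              have h1 : pvYmax gmax [pt] = max gmax pt.2 := rfl
              rw [h1, max_eq_left (le_trans hptmin hminmax)]
            · rw [pvYmin_append, ← hgmin]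
              have h2 : pvYmin gmin [pt] = min gmin pt.2 := rfl
              rw [h2, min_eq_right hptmin]
        · -- split branch
          have hinner := pvInner_eq pt (c :: t) [] [] (by intro q h; cases h) hpt
            (by intro q h; cases h) (by intro q h; cases h)
          simp only [List.nil_append, pvYmax_nil, pvOmax, pvOmin] at hinner
          have hA : pvStepA tolerance (groups, c :: t) pt
              = (groups ++ [(pvSplitB pt.2 (c :: t) (pvSufScanB (c :: t)) pt.2 none none [] []).1],
                 pt :: (pvSplitB pt.2 (c :: t) (pvSufScanB (c :: t)) pt.2 none none [] []).2.1) := by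
            simp only [pvStepA]
            rw [if_neg (by simp), hnmd, if_neg hc, hinner]
          have hB : pvStepB tolerance (groups, c :: t, gmax, gmin) pt
              = (groups ++ [(pvSplitB pt.2 (c :: t) (pvSufScanB (c :: t)) pt.2 none none [] []).1],
                 pt :: (pvSplitB pt.2 (c :: t) (pvSufScanB (c :: t)) pt.2 none none [] []).2.1,
                 (pvSplitB pt.2 (c :: t) (pvSufScanB (c :: t)) pt.2 none none [] []).2.2, pt.2) := by
            simp only [pvStepB]
            rw [if_neg (by simp), if_neg hc]
          rw [hA, hB]
          have hmv : ∀ q ∈ (pvSplitB pt.2 (c :: t) (pvSufScanB (c :: t)) pt.2 none none [] []).2.1,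
              pt.2 ≤ q.2 := by
            intro q hq
            rcases pvSplitB_moved_sub pt.2 (c :: t) (pvSufScanB (c :: t)) pt.2 none none [] []
              q hq with h | h
            · cases h
            · exact hpt q h
          refine ih _ _ _ _ hpair' ?_ ?_
          · intro p hp q hq
            rcases List.mem_cons.1 hq with h | h
            · subst h; exact hd p hp
            · exact le_trans (hd p hp) (hmv q h)
          · right
            exact ⟨pt, _, rfl,
              pvSplitB_mmax pt.2 (c :: t) (pvSufScanB (c :: t)) pt.2 none none [] [] rfl,
              (pvYmin_const pt.2 _ hmv).symm⟩

theorem pvSorted_eq (points : List (Int × Int)) :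
    PySem.List.sorted points (fun p => -p.2) = PySem.List.sorted points (fun p => p.2) true := by
  rw [PySem.List.sorted_eq_foldl_insertBy, PySem.List.sorted_rev_eq_foldl_insertBy]
  have : (fun (a b : Int × Int) => decide ((fun p : Int × Int => -p.2) a < (fun p : Int × Int => -p.2) b))
       = (fun (a b : Int × Int) => decide ((fun p : Int × Int => p.2) b < (fun p : Int × Int => p.2) a)) := by
    funext a b
    simp only []
    exact decide_eq_decide.2 (by omega)
  rw [this]

-- ===== VERDICT (by name: the statement is the Claim_ definition above) =====
theorem find_optimal_grouping_spec : Claim_equal_find_optimal_grouping := by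
  intro points tolerance _
  unfold Spec_find_optimal_grouping find_optimal_grouping find_optimal_grouping_alt
  rw [pvSorted_eq]
  have hpair := PySem.List.sorted_pairwise_rev points (fun p : Int × Int => p.2)
  obtain ⟨h1, h2⟩ := pvOuter_eq tolerance (PySem.List.sorted points (fun p => p.2) true)
    [] [] 0 0 hpair (by intro p _ q hq; cases hq) (Or.inl rfl)
  simp only [h1, h2]
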